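-- pv_equiv track=rewrite | github.com/kiwifruit13/HarnessEngineering | skills/planning-with-files/scripts/validate-rules.py | validate_findings
-- ===== SOURCE A (Python) =====
-- from typing import Dict, List, Tuple
--
-- def validate_findings(content: str) -> List[Dict]:
--     """Validate findings.md structure and content."""
--     issues = []
--
--     if not content:
--         issues.append({
--             "severity": "medium",
--             "category": "missing-file",
--             "message": "findings.md does not exist or is empty",
--             "suggestion": "Create findings.md to document discoveries and decisions"
--         })
--         return issues
--
--     lines = content.split('\n')
--
--     # Check for key sections
--     sections = [
--         ("Requirements", "## Requirements"),
--         ("Research Findings", "## Research Findings"),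
--         ("Technical Decisions", "## Technical Decisions")
--     ]
--
--     for section_name, section_marker in sections:
--         has_section = any(section_marker in line for line in lines)
--         if not has_section:
--             issues.append({
--                 "severity": "low",
--                 "category": "missing-section",
--                 "message": f"No {section_name} section in findings.md",
--                 "suggestion": f"Add {section_marker} section to track {section_name.lower()}"
--             })
--
--     # Check for empty sections
--     current_section = None
--     empty_sections = []
--     for line in lines:
--         if line.startswith('##'):
--             current_section = line
--         elif current_section and line.strip():
--             current_section = None
--
--     return issues
-- ===== SOURCE B (Python) =====
-- from typing import Dict, List, Tuple
--
-- def validate_findings(content: str) -> List[Dict]: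
--     """Validate findings.md structure and content."""
--     if not content:
--         return [{
--             "severity": "medium",
--             "category": "missing-file",
--             "message": "findings.md does not exist or is empty",
--             "suggestion": "Create findings.md to document discoveries and decisions"
--         }]
--
--     # Worklist of section names still missing; each line filters out the ones
--     # whose marker ("## " + name) it contains.
--     remaining = ["Requirements", "Research Findings", "Technical Decisions"]
--     for line in content.split('\n'):
--         remaining = [n for n in remaining if "## " + n not in line]
--
--     return [{
--         "severity": "low",
--         "category": "missing-section",
--         "message": f"No {n} section in findings.md",
--         "suggestion": f"Add ## {n} section to track {n.lower()}"
--     } for n in remaining]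
-- ===== Notes on version B (the rewrite author's own statement) =====
-- stated objective: simpler
-- what changed: B folds once over the lines maintaining a shrinking worklist of still-missing section names (markers derived as '## '+name) and maps the survivors to issues, where A rescans all lines with any() per section and carries a dead trailing loop; B drops that dead loop.
import Mathlib
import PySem

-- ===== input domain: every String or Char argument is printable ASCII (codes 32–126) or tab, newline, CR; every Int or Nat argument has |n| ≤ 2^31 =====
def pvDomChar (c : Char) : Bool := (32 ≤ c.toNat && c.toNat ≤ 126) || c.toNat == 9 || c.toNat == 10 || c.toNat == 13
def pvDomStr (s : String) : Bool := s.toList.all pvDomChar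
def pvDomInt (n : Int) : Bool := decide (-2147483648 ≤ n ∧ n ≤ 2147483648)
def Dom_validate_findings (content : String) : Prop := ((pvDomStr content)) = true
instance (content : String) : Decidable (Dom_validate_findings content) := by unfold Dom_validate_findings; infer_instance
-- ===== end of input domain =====

-- B folds once over the lines, shrinking a worklist of still-missing section names
-- (markers derived as "## " + name) and maps the survivors to issues, instead of
-- A's per-section any() rescans; A's dead trailing loop is dropped (objective: simpler).

-- ===== PORT A =====
def pvMissingFileIssueA : List (String × String) :=
  [("severity", "medium"), ("category", "missing-file"),
   ("message", "findings.md does not exist or is empty"),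
   ("suggestion", "Create findings.md to document discoveries and decisions")]

def pvSectionsA : List (String × String) :=
  [("Requirements", "## Requirements"),
   ("Research Findings", "## Research Findings"),
   ("Technical Decisions", "## Technical Decisions")]

def pvMissingSectionIssueA (name marker : String) : List (String × String) :=
  [("severity", "low"), ("category", "missing-section"),
   ("message", "No " ++ name ++ " section in findings.md"),
   ("suggestion", "Add " ++ marker ++ " section to track " ++ PySem.Str.lower name)]

def validate_findings (content : String) : List (List (String × String)) :=
  if content = "" then [pvMissingFileIssueA]
  else
    let lines := (PySem.Str.split? content "\n").getD []
    let issues := pvSectionsA.foldl (fun issues p =>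
      if lines.any (fun line => PySem.Str.isIn p.2 line) then issues
      else issues ++ [pvMissingSectionIssueA p.1 p.2]) []
    -- A's dead trailing loop over the lines (its state is never read):
    let _cur := lines.foldl (fun (cur : Option String) line =>
      if PySem.Str.startswith line "##" then some line
      else if cur.isSome && PySem.Str.strip line ≠ "" then none
      else cur) none
    issues

-- ===== PORT B =====
def pvIssueOfNameB (n : String) : List (String × String) :=
  [("severity", "low"), ("category", "missing-section"),
   ("message", "No " ++ n ++ " section in findings.md"),
   ("suggestion", "Add ## " ++ n ++ " section to track " ++ PySem.Str.lower n)]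

def validate_findings_alt (content : String) : List (List (String × String)) :=
  if content = "" then
    [[("severity", "medium"), ("category", "missing-file"),
      ("message", "findings.md does not exist or is empty"),
      ("suggestion", "Create findings.md to document discoveries and decisions")]]
  else
    (((PySem.Str.split? content "\n").getD []).foldl
      (fun rem line => rem.filter (fun n => !(PySem.Str.isIn ("## " ++ n) line)))
      ["Requirements", "Research Findings", "Technical Decisions"]).map pvIssueOfNameB

-- ===== PRECONDITION & SPEC =====
def Spec_validate_findings (content : String) (out : List (List (String × String))) : Prop := out = validate_findings_alt content
instance (content : String) (out : List (List (String × String))) : Decidable (Spec_validate_findings content out) := by unfold Spec_validate_findings; infer_instance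

-- ===== CLAIM (what is proved, stated in full; the proofs are below) =====
def Claim_equal_validate_findings : Prop := ∀ (content : String), Dom_validate_findings content → Spec_validate_findings content (validate_findings content)

-- ===== LEMMAS AND PROOFS =====

-- B's line-by-line worklist shrinking equals one filter by "no line contains it"
theorem pv_foldl_filter (c : String → String → Bool) (lines : List String) (init : List String) :
    lines.foldl (fun rem line => rem.filter (fun n => !(c n line))) init
      = init.filter (fun n => lines.all (fun line => !(c n line))) := by
  induction lines generalizing init with
  | nil => simp
  | cons l ls ih =>
    simp only [List.foldl_cons, ih, List.filter_filter, List.all_cons]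
    congr 1
    funext n
    cases c n l <;> simp

theorem validate_findings_eq_alt (content : String) :
    validate_findings content = validate_findings_alt content := by
  unfold validate_findings validate_findings_alt
  by_cases h : content = ""
  · simp [h, pvMissingFileIssueA]
  · simp only [h, if_false]
    set lines := (PySem.Str.split? content "\n").getD [] with hl
    rw [pv_foldl_filter (fun n line => PySem.Str.isIn ("## " ++ n) line) lines]
    have e1 : ("## " ++ "Requirements" : String) = "## Requirements" := by decide
    have e2 : ("## " ++ "Research Findings" : String) = "## Research Findings" := by decide
    have e3 : ("## " ++ "Technical Decisions" : String) = "## Technical Decisions" := by decide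
    simp only [pvSectionsA, List.foldl_cons, List.foldl_nil, List.filter_cons, List.filter_nil,
      e1, e2, e3, List.all_eq_not_any_not, Bool.not_not]
    cases hb1 : lines.any (fun line => PySem.Str.isIn "## Requirements" line) <;>
    cases hb2 : lines.any (fun line => PySem.Str.isIn "## Research Findings" line) <;>
    cases hb3 : lines.any (fun line => PySem.Str.isIn "## Technical Decisions" line) <;>
      simp [pvMissingSectionIssueA, pvIssueOfNameB]

-- ===== VERDICT (by name: the statement is the Claim_ definition above) =====
theorem validate_findings_spec : Claim_equal_validate_findings := by
  intro content _
  exact validate_findings_eq_alt content
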